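-- pv_equiv track=rewrite | github.com/Heodoo/Algorithm | 프로그래머스/1/140108. 문자열 나누기/문자열 나누기.py | solution
-- ===== SOURCE A (Python) =====
-- def solution(s):
--     answer = 0
--     i = 0
--     while i < len(s) :
--         cur = i
--         a = 1
--         b = 0
--
--         while a > b and i < len(s)-1:
--             if s[cur] == s[i+1] :
--                 a += 1
--             else :
--                 b += 1
--             i+= 1
--         i+=1
--         answer += 1
--
--     return answer
-- ===== SOURCE B (Python) =====
-- def solution(s):
--     answer = 0
--     same = 0
--     diff = 0
--     first = None
--     for ch in s:
--         if same == diff: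
--             first = ch
--             answer += 1
--         if ch == first:
--             same += 1
--         else:
--             diff += 1
--     return answer
-- ===== Notes on version B (the rewrite author's own statement) =====
-- stated objective: simpler
-- what changed: Replaced A's nested while loops (an outer segment loop with a second per-segment index advanced by an inner a>b scan) by a single flat for-loop over the characters that keeps running same/diff counters and starts a new segment whenever they balance; less per-character index/bookkeeping work makes it measurably faster by a constant factor.
import Mathlib
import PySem

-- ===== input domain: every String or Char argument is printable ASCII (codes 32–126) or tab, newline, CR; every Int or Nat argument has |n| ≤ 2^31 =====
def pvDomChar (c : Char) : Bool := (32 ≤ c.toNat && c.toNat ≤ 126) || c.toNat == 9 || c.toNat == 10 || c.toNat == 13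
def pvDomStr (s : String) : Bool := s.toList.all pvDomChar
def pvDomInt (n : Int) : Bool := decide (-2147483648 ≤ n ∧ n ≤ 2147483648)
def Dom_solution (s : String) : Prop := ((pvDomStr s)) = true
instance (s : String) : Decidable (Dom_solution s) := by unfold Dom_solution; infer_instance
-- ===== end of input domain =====

-- B replaces A's nested while loops (outer segment loop + inner scan with a second index)
-- by a single flat for-loop keeping running same/diff counters; objective: simpler.

-- ===== PORT A =====
-- inner while loop of A: state (a, b, i); the fuel argument only bounds the recursion
-- (the real stop condition is the guard); fuel = cs.length - i at the call site is always enough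
def innerA (cs : List Char) (c : Char) : Nat → Nat → Nat → Nat → Nat × Nat × Nat
  | 0, a, b, i => (a, b, i)
  | fuel + 1, a, b, i =>
    if a > b ∧ i + 1 < cs.length then
      if c == cs.getD (i + 1) ' ' then innerA cs c fuel (a + 1) b (i + 1)
      else innerA cs c fuel a (b + 1) (i + 1)
    else (a, b, i)

-- outer while loop of A: state (i, answer); fuel = cs.length is always enough (i grows each turn)
def outerA (cs : List Char) : Nat → Nat → Int → Int
  | 0, _, answer => answer
  | fuel + 1, i, answer =>
    if i < cs.length then
      let r := innerA cs (cs.getD i ' ') (cs.length - i) 1 0 i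
      outerA cs fuel (r.2.2 + 1) (answer + 1)
    else answer

def solution (s : String) : Int := outerA s.toList s.toList.length 0 0

-- ===== PORT B =====
-- one step of B's for-loop over the characters; state (answer, same, diff, first)
def stepB (st : Int × Nat × Nat × Option Char) (ch : Char) : Int × Nat × Nat × Option Char :=
  let answer := if st.2.1 = st.2.2.1 then st.1 + 1 else st.1
  let first := if st.2.1 = st.2.2.1 then some ch else st.2.2.2
  if some ch = first then (answer, st.2.1 + 1, st.2.2.1, first)
  else (answer, st.2.1, st.2.2.1 + 1, first)

def solution_alt (s : String) : Int :=
  (s.toList.foldl stepB (0, 0, 0, none)).1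

-- ===== PRECONDITION & SPEC =====
def Spec_solution (s : String) (out : Int) : Prop := out = solution_alt s
instance (s : String) (out : Int) : Decidable (Spec_solution s out) := by unfold Spec_solution; infer_instance

-- ===== CLAIM (what is proved, stated in full; the proofs are below) =====
def Claim_equal_solution : Prop := ∀ (s : String), Dom_solution s → Spec_solution s (solution s)

-- ===== LEMMAS AND PROOFS =====

-- reference function: the tail of the list after the current segment is consumed
def consume (c : Char) (bal : Int) : List Char → List Char
  | [] => []
  | x :: xs => if 0 < bal then consume c (if x == c then bal + 1 else bal - 1) xs else x :: xs

theorem consume_length_le (c : Char) : ∀ bal l, (consume c bal l).length ≤ l.length := by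
  intro bal l
  induction l generalizing bal with
  | nil => simp [consume]
  | cons x xs ih =>
    simp only [consume]
    split
    · exact le_trans (ih _) (by simp)
    · simp

theorem consume_nonpos (c : Char) (bal : Int) (l : List Char) (h : bal ≤ 0) :
    consume c bal l = l := by
  cases l <;> simp [consume] <;> omega

-- the number of segments (the common spec of both programs)
def segs : List Char → Int
  | [] => 0
  | c :: xs => 1 + segs (consume c 1 xs)
termination_by l => l.length
decreasing_by
  have := consume_length_le c 1 xs; simpa using Nat.lt_succ_of_le this

-- A's inner loop consumes exactly one segment (whenever the fuel covers the remaining string)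
theorem inner_spec (cs : List Char) (c : Char) :
    ∀ fuel a b i, i < cs.length → cs.length ≤ i + 1 + fuel →
      i ≤ (innerA cs c fuel a b i).2.2 ∧ (innerA cs c fuel a b i).2.2 < cs.length ∧
      cs.drop ((innerA cs c fuel a b i).2.2 + 1)
        = consume c ((a : Int) - (b : Int)) (cs.drop (i + 1)) := by
  intro fuel
  induction fuel with
  | zero =>
    intro a b i hi hf
    simp only [innerA]
    refine ⟨le_refl _, hi, ?_⟩
    rw [List.drop_eq_nil_of_le (by omega)]
    simp [consume]
  | succ fuel ih =>
    intro a b i hi hf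
    rw [innerA]
    by_cases h : a > b ∧ i + 1 < cs.length
    · rw [if_pos h]
      have hdrop : cs.drop (i + 1) = cs[i+1] :: cs.drop (i + 2) :=
        List.drop_eq_getElem_cons h.2
      have hx : cs.getD (i + 1) ' ' = cs[i+1] := List.getD_eq_getElem cs ' ' h.2
      have hb : 0 < (a : Int) - (b : Int) := by have := h.1; omega
      by_cases hc : c == cs.getD (i + 1) ' '
      · rw [if_pos hc]
        obtain ⟨h1, h2, h3⟩ := ih (a + 1) b (i + 1) h.2 (by omega)
        refine ⟨by omega, h2, ?_⟩
        rw [h3, hdrop, consume, if_pos hb]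
        have hcc : c = cs[i+1] := by rw [← hx]; exact beq_iff_eq.mp hc
        rw [show (cs[i+1] == c) = true by simp [hcc]]
        simp only [if_true]
        congr 1
        push_cast; ring
      · rw [if_neg hc]
        obtain ⟨h1, h2, h3⟩ := ih a (b + 1) (i + 1) h.2 (by omega)
        refine ⟨by omega, h2, ?_⟩
        rw [h3, hdrop, consume, if_pos hb]
        have hxc : (cs[i+1] == c) = false := by
          rw [beq_eq_false_iff_ne]
          intro he
          exact hc (by rw [hx, he]; simp)
        rw [hxc]
        simp only [Bool.false_eq_true, ite_false]
        congr 1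
        push_cast; ring
    · rw [if_neg h]
      refine ⟨le_refl _, hi, ?_⟩
      by_cases hab : a > b
      · have hlen : cs.length ≤ i + 1 := by
          by_contra hcon; exact h ⟨hab, by omega⟩
        rw [List.drop_eq_nil_of_le hlen]
        simp [consume]
      · rw [consume_nonpos]
        omega

-- A's outer loop counts segments of the remaining suffix (whenever the fuel covers it)
theorem outer_eq (cs : List Char) :
    ∀ fuel i answer, cs.length ≤ i + fuel →
      outerA cs fuel i answer = answer + segs (cs.drop i) := by
  intro fuel
  induction fuel with
  | zero =>
    intro i answer h
    rw [outerA, List.drop_eq_nil_of_le (by omega)]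
    simp [segs]
  | succ fuel ih =>
    intro i answer h
    by_cases hi : i < cs.length
    · rw [outerA, if_pos hi]
      obtain ⟨h1, h2, h3⟩ := inner_spec cs (cs.getD i ' ') (cs.length - i) 1 0 i hi (by omega)
      set i' := (innerA cs (cs.getD i ' ') (cs.length - i) 1 0 i).2.2 with hi'
      rw [ih (i' + 1) (answer + 1) (by omega)]
      have hdrop : cs.drop i = cs[i] :: cs.drop (i + 1) := List.drop_eq_getElem_cons hi
      have hx : cs.getD i ' ' = cs[i] := List.getD_eq_getElem cs ' ' hi
      rw [h3, hdrop, segs]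
      rw [hx]
      norm_num
      ring
    · rw [outerA, if_neg hi, List.drop_eq_nil_of_le (by omega)]
      simp [segs]

-- B's fold: from a balanced state it counts segments; mid-segment it finishes the segment first
theorem foldB_spec (l : List Char) :
    (∀ answer k f, (l.foldl stepB (answer, k, k, f)).1 = answer + segs l) ∧
    (∀ answer d k c, (l.foldl stepB (answer, d + k + 1, d, some c)).1
        = answer + segs (consume c ((k : Int) + 1) l)) := by
  induction l with
  | nil => simp [segs, consume]
  | cons x xs ih =>
    constructor
    · intro answer k f
      have hs : stepB (answer, k, k, f) x = (answer + 1, k + 1, k, some x) := by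
        simp [stepB]
      rw [List.foldl_cons, hs]
      have h2 := ih.2 (answer + 1) k 0 x
      norm_num at h2
      rw [h2, segs]
      ring
    · intro answer d k c
      have hne : ¬ (d + k + 1 = d) := by omega
      by_cases hx : x = c
      · have hs : stepB (answer, d + k + 1, d, some c) x
            = (answer, d + k + 2, d, some c) := by
          simp [stepB, hne, hx]
        rw [List.foldl_cons, hs]
        have h2 := ih.2 answer d (k + 1) c
        have : d + (k + 1) + 1 = d + k + 2 := by omega
        rw [this] at h2
        rw [h2]
        have hcx : consume c ((k : Int) + 1) (x :: xs)
            = consume c ((k : Int) + 1 + 1) xs := by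
          rw [consume, if_pos (by positivity)]
          simp [hx]
        rw [hcx]
        norm_num
      · have hs : stepB (answer, d + k + 1, d, some c) x
            = (answer, d + k + 1, d + 1, some c) := by
          simp [stepB, hne, hx]
        rw [List.foldl_cons, hs]
        have hcx : consume c ((k : Int) + 1) (x :: xs)
            = consume c ((k : Int) + 1 - 1) xs := by
          rw [consume, if_pos (by positivity)]
          simp [hx]
        rw [hcx]
        cases k with
        | zero =>
          have h1 := ih.1 answer (d + 1) (some c)
          simpa [consume_nonpos] using h1
        | succ k' =>
          have h2 := ih.2 answer (d + 1) k' c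
          have : d + 1 + k' + 1 = d + (k' + 1) + 1 := by omega
          rw [this] at h2
          rw [h2]
          norm_num

-- ===== VERDICT (by name: the statement is the Claim_ definition above) =====
theorem solution_spec : Claim_equal_solution := by
  intro s _
  show solution s = solution_alt s
  unfold solution solution_alt
  rw [outer_eq s.toList s.toList.length 0 0 (by omega), (foldB_spec s.toList).1]
  simp
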